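-- pv_equiv track=rewrite | github.com/shradhakapoor/practice-codes | Miscellaneous.py | substringWithOneRepeated
-- ===== SOURCE A (Python) =====
-- def substringWithOneRepeated(inp, num):
--     n = len(inp)
--     if num == 1:
--         return []
--     if num > n:
--         return []
--
--     frequencyChars = [[], []] # index 0 : list of chars with frequency 1
--                         # index 1 : list of chars with frequency 2
--     res = []
--     i = num-1
--     wndw = list(inp[:num])
--     for c in wndw:
--         if c not in frequencyChars[0]:
--             frequencyChars[0].append(c)
--         else:
--             frequencyChars[1].append(c)
--
--     while i < n:
--
--         if len(frequencyChars[1]) == 1: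
--             res.append(('').join(wndw))
--
--         rmchar = wndw.pop(0)
--         if rmchar in frequencyChars[1]:
--             frequencyChars[1].remove(rmchar)
--         else:
--             frequencyChars[0].remove(rmchar)
--         i += 1
--         if i < n:
--             wndw.append(inp[i])
--             if inp[i] not in frequencyChars[0]:
--                 frequencyChars[0].append(inp[i])
--             else:
--                 frequencyChars[1].append(inp[i])
--
--     return res
-- ===== SOURCE B (Python) =====
-- def substringWithOneRepeated(inp, num):
--     n = len(inp)
--     if num <= 1 or num > n:
--         return []
--     return [inp[j:j+num] for j in range(n - num + 1)
--             if len(set(inp[j:j+num])) == num - 1]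
-- ===== Notes on version B (the rewrite author's own statement) =====
-- stated objective: simpler
-- what changed: B replaces A's stateful sliding window (a char list plus two incrementally-maintained frequency lists with pop/remove bookkeeping) by a stateless one-line comprehension that slices each window and tests len(set(window)) == num-1 directly.
-- outside the precondition, e.g. on substringWithOneRepeated('aab', -1): A returns ['aa', 'aa'], B returns []; on substringWithOneRepeated('a', 0): A raises IndexError, B returns []
import Mathlib
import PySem

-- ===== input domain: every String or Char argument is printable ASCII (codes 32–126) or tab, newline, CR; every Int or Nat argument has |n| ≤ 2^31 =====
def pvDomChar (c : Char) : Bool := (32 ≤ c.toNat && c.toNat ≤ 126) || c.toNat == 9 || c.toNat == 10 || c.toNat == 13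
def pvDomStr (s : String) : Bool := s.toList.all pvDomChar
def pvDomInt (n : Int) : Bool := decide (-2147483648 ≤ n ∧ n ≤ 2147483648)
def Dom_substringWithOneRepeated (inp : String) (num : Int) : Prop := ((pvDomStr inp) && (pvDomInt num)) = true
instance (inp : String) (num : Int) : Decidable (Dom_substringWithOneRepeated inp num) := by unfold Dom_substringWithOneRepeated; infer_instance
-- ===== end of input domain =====

-- B replaces A's stateful sliding window (window list + two incrementally maintained frequency
-- lists) by a stateless per-window slice-and-count-distinct comprehension: simpler, same cost.
-- Pre_ restricts to num ≥ 1, the natural domain of a substring length: for num ≤ 0 A either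
-- raises IndexError or returns values shaped by Python's negative slice/index wraparound.


-- ===== PORT A =====
-- for c in wndw: if c not in frequencyChars[0]: frequencyChars[0].append(c) else: frequencyChars[1].append(c)
def pvBuildFreq (wndw : List Char) : List Char × List Char :=
  wndw.foldl (fun fc c =>
    if !(fc.1.contains c) then (fc.1 ++ [c], fc.2) else (fc.1, fc.2 ++ [c])) ([], [])

-- the 'while i < n' loop of A; fuel = number of remaining iterations; the 'none' match arms are
-- where Python raises (IndexError / ValueError)
def pvLoopA (s : List Char) (n : Int) : Nat → Int → List Char → List Char → List Char → List String → List String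
  | 0, _, _, _, _, res => res
  | fuel+1, i, wndw, f0, f1, res =>
    if i < n then
      let res' := if f1.length = 1 then res ++ [String.ofList wndw] else res
      match PySem.List.pop? wndw 0 with
      | none => res'  -- IndexError
      | some (rm, rest) =>
        match (if f1.contains rm then (PySem.List.remove? f1 rm).map (fun f1' => (f0, f1'))
               else (PySem.List.remove? f0 rm).map (fun f0' => (f0', f1))) with
        | none => res'  -- ValueError
        | some (f0', f1') =>
          if i + 1 < n then
            match PySem.List.pyGet? s (i + 1) with
            | none => res'  -- IndexError
            | some c =>
              if !(f0'.contains c) then pvLoopA s n fuel (i+1) (rest ++ [c]) (f0' ++ [c]) f1' res'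
              else pvLoopA s n fuel (i+1) (rest ++ [c]) f0' (f1' ++ [c]) res'
          else pvLoopA s n fuel (i+1) rest f0' f1' res'
    else res

def substringWithOneRepeated (inp : String) (num : Int) : List String :=
  if num = 1 then []
  else if num > ((inp.toList.length : Int)) then []
  else
    pvLoopA inp.toList ((inp.toList.length : Int))
      (((inp.toList.length : Int)) - (num - 1)).toNat (num - 1)
      (PySem.List.slice inp.toList none (some num))
      (pvBuildFreq (PySem.List.slice inp.toList none (some num))).1
      (pvBuildFreq (PySem.List.slice inp.toList none (some num))).2 []

-- ===== PORT B =====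
def substringWithOneRepeated_alt (inp : String) (num : Int) : List String :=
  if num ≤ 1 ∨ num > ((inp.toList.length : Int)) then []
  else
    (PySem.List.pyRange 0 (((inp.toList.length : Int)) - num + 1) 1).foldl (fun res j =>
      if ((PySem.Set.ofList (PySem.List.slice inp.toList (some j) (some (j + num)))).length : Int) = num - 1
      then res ++ [String.ofList (PySem.List.slice inp.toList (some j) (some (j + num)))]
      else res) []

-- ===== PRECONDITION & SPEC =====
-- Pre_ excludes num ≤ 0, outside the natural domain of a substring length: there A either raises
-- IndexError (whenever the initial window slice inp[:num] is empty) or returns windows produced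
-- by Python's negative slice/index wraparound; B returns [].
def Pre_substringWithOneRepeated (inp : String) (num : Int) : Prop := 1 ≤ num
instance (inp : String) (num : Int) : Decidable (Pre_substringWithOneRepeated inp num) := by unfold Pre_substringWithOneRepeated; infer_instance
def pvWitness_substringWithOneRepeated : String × Int := ("aab", 2)

def Spec_substringWithOneRepeated (inp : String) (num : Int) (out : List String) : Prop := out = substringWithOneRepeated_alt inp num
instance (inp : String) (num : Int) (out : List String) : Decidable (Spec_substringWithOneRepeated inp num out) := by unfold Spec_substringWithOneRepeated; infer_instance

-- ===== CLAIM (what is proved, stated in full; the proofs are below) =====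
def Claim_equal_substringWithOneRepeated : Prop := ∀ (inp : String) (num : Int), Dom_substringWithOneRepeated inp num → Pre_substringWithOneRepeated inp num → Spec_substringWithOneRepeated inp num (substringWithOneRepeated inp num)
-- ===== LEMMAS AND PROOFS =====

-- the common specification both ports reach: fold over the window start positions js, appending
-- the window when its number of distinct characters is m - 1
def pvWinFold (s : List Char) (m : Nat) (res : List String) (js : List Nat) : List String :=
  js.foldl (fun r j =>
    if (PySem.Set.ofList ((s.drop j).take m)).length = m - 1
    then r ++ [String.ofList ((s.drop j).take m)] else r) res

-- B unfolds to pvWinFold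
theorem pv_alt_eq_winFold (inp : String) (num : Int) (h2 : 2 ≤ num) (hn : num ≤ (inp.toList.length : Int)) :
    substringWithOneRepeated_alt inp num
      = pvWinFold inp.toList num.toNat [] (List.range (inp.toList.length - num.toNat + 1)) := by
  have hnum : ((num.toNat : Nat) : Int) = num := Int.toNat_of_nonneg (by omega)
  unfold substringWithOneRepeated_alt pvWinFold
  rw [if_neg (by omega : ¬(num ≤ 1 ∨ num > (inp.toList.length : Int)))]
  rw [PySem.List.pyRange_one]
  rw [(by omega : (((inp.toList.length : Int)) - num + 1 - 0).toNat = inp.toList.length - num.toNat + 1)]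
  rw [List.foldl_map]
  apply List.foldl_ext
  intro r j _
  simp only [zero_add]
  have hs : PySem.List.slice inp.toList (some ((j : Nat) : Int)) (some (((j : Nat) : Int) + num))
      = (inp.toList.drop j).take num.toNat := by
    have h := PySem.List.slice_natCast_add inp.toList j num.toNat
    rwa [hnum] at h
  rw [hs]
  exact if_congr (by omega) rfl rfl

-- invariant of the frequency-list building fold of A
theorem pv_build_go (l : List Char) : ∀ (acc f0 f1 : List Char),
    f0.Nodup → (∀ c, c ∈ f0 ↔ c ∈ acc) → (f0 ++ f1).Perm acc →
    ((l.foldl (fun fc c => if !(fc.1.contains c) then (fc.1 ++ [c], fc.2) else (fc.1, fc.2 ++ [c])) (f0, f1)).1.Nodup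
      ∧ (∀ c, c ∈ (l.foldl (fun fc c => if !(fc.1.contains c) then (fc.1 ++ [c], fc.2) else (fc.1, fc.2 ++ [c])) (f0, f1)).1 ↔ c ∈ acc ++ l)
      ∧ (((l.foldl (fun fc c => if !(fc.1.contains c) then (fc.1 ++ [c], fc.2) else (fc.1, fc.2 ++ [c])) (f0, f1)).1
          ++ (l.foldl (fun fc c => if !(fc.1.contains c) then (fc.1 ++ [c], fc.2) else (fc.1, fc.2 ++ [c])) (f0, f1)).2).Perm (acc ++ l))) := by
  induction l with
  | nil => intro acc f0 f1 hnd hmem hperm; simpa using ⟨hnd, hmem, hperm⟩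
  | cons c l ih =>
    intro acc f0 f1 hnd hmem hperm
    simp only [List.foldl_cons]
    by_cases hc : c ∈ f0
    · rw [if_neg (by simp [hc] : ¬((!f0.contains c) = true))]
      have hmem' : ∀ d, d ∈ f0 ↔ d ∈ acc ++ [c] := by
        intro d
        rw [hmem d]
        constructor
        · intro h; exact List.mem_append_left _ h
        · intro h
          rcases List.mem_append.1 h with h | h
          · exact h
          · rw [List.mem_singleton] at h; exact h ▸ (hmem c).1 hc
      have hperm' : (f0 ++ (f1 ++ [c])).Perm (acc ++ [c]) := by
        rw [List.perm_iff_count]; intro a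
        have hpa := hperm.count_eq a
        by_cases hac : a = c
        · subst hac
          simp only [List.count_append, List.count_cons_self, List.count_nil] at *
          omega
        · simp only [List.count_append] at *
          omega
      have h := ih (acc ++ [c]) f0 (f1 ++ [c]) hnd hmem' hperm'
      simpa [List.append_assoc] using h
    · rw [if_pos (by simp [hc] : ((!f0.contains c) = true))]
      have hnd' : (f0 ++ [c]).Nodup := by
        rw [List.nodup_append]
        exact ⟨hnd, List.nodup_singleton c, by
          intro a ha b hb; rw [List.mem_singleton] at hb; subst hb; exact fun h => hc (h ▸ ha)⟩
      have hmem' : ∀ d, d ∈ f0 ++ [c] ↔ d ∈ acc ++ [c] := by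
        intro d; simp only [List.mem_append]; rw [hmem d]
      have hperm' : ((f0 ++ [c]) ++ f1).Perm (acc ++ [c]) := by
        rw [List.perm_iff_count]; intro a
        have hpa := hperm.count_eq a
        by_cases hac : a = c
        · subst hac
          simp only [List.count_append, List.count_cons_self, List.count_nil] at *
          omega
        · simp only [List.count_append] at *
          omega
      have h := ih (acc ++ [c]) (f0 ++ [c]) f1 hnd' hmem' hperm'
      simpa [List.append_assoc] using h

theorem pv_buildFreq_inv (wndw : List Char) :
    (pvBuildFreq wndw).1.Nodup ∧ (∀ c, c ∈ (pvBuildFreq wndw).1 ↔ c ∈ wndw)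
      ∧ ((pvBuildFreq wndw).1 ++ (pvBuildFreq wndw).2).Perm wndw := by
  have h := pv_build_go wndw [] [] [] List.nodup_nil (by simp) (by simp)
  simpa [pvBuildFreq] using h

-- the main loop invariant: with a window of length m starting at j and the frequency lists
-- describing it, the loop produces exactly the winFold over the remaining start positions
theorem pv_loopA_eq (s : List Char) (m : Nat) (hm : 2 ≤ m) :
    ∀ (k j : Nat) (wndw f0 f1 : List Char) (res : List String),
      j + k = s.length - m + 1 → m ≤ s.length →
      wndw = (s.drop j).take m →
      f0.Nodup → (∀ c, c ∈ f0 ↔ c ∈ wndw) → (f0 ++ f1).Perm wndw →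
      pvLoopA s (s.length : Int) k ((j : Int) + (m : Int) - 1) wndw f0 f1 res
        = pvWinFold s m res (List.range' j k) := by
  intro k
  induction k with
  | zero =>
    intro j wndw f0 f1 res _ _ _ _ _ _
    simp [pvLoopA, pvWinFold]
  | succ k ih =>
    intro j wndw f0 f1 res hjk hms hw hnd hmem hperm
    have hjm : j + m ≤ s.length := by omega
    have hjlt : j < s.length := by omega
    obtain ⟨m', rfl⟩ : ∃ m', m = m' + 1 := ⟨m - 1, by omega⟩
    have hdrop : s.drop j = s[j] :: s.drop (j + 1) := List.drop_eq_getElem_cons hjlt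
    have hwin : wndw = s[j] :: (s.drop (j + 1)).take m' := by
      rw [hw, hdrop, List.take_succ_cons]
    have hwlen : wndw.length = m' + 1 := by
      rw [hw]; simp only [List.length_take, List.length_drop]; omega
    have hflen : f0.length + f1.length = m' + 1 := by
      have h := hperm.length_eq; simpa [hwlen] using h
    have hf0len : f0.length = (PySem.Set.ofList wndw).length :=
      ((List.perm_ext_iff_of_nodup hnd (PySem.Set.nodup_ofList _)).2
        (fun a => by rw [hmem a, PySem.Set.mem_ofList])).length_eq
    have hcond : f1.length = 1 ↔ (PySem.Set.ofList wndw).length = m' + 1 - 1 := by omega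
    have hc0f0 : s[j] ∈ f0 := (hmem _).2 (by rw [hwin]; exact List.mem_cons_self ..)
    have hf0c1 : f0.count s[j] = 1 := List.count_eq_one_of_mem hnd hc0f0
    have hpacount := hperm.count_eq
    have hilt : ((j : Int) + ((m' + 1 : Nat) : Int) - 1 < (s.length : Int)) := by push_cast; omega
    have hpop : PySem.List.pop? wndw 0 = some (s[j], (s.drop (j + 1)).take m') := by
      rw [hwin, PySem.List.pop?_zero_cons]
    rw [List.range'_succ]
    simp only [pvLoopA, hpop]
    rw [if_pos hilt]
    -- the continuation after the removal, for both removal branches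
    have key : ∀ f0' f1' : List Char, f0'.Nodup → (∀ c, c ∈ f0' ↔ c ∈ (s.drop (j + 1)).take m') →
        (f0' ++ f1').Perm ((s.drop (j + 1)).take m') →
        (if (j : Int) + ((m' + 1 : Nat) : Int) - 1 + 1 < (s.length : Int) then
            match PySem.List.pyGet? s ((j : Int) + ((m' + 1 : Nat) : Int) - 1 + 1) with
            | none => (if f1.length = 1 then res ++ [String.ofList wndw] else res)
            | some c =>
              if !(f0'.contains c) then
                pvLoopA s (s.length : Int) k ((j : Int) + ((m' + 1 : Nat) : Int) - 1 + 1)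
                  ((s.drop (j + 1)).take m' ++ [c]) (f0' ++ [c]) f1'
                  (if f1.length = 1 then res ++ [String.ofList wndw] else res)
              else
                pvLoopA s (s.length : Int) k ((j : Int) + ((m' + 1 : Nat) : Int) - 1 + 1)
                  ((s.drop (j + 1)).take m' ++ [c]) f0' (f1' ++ [c])
                  (if f1.length = 1 then res ++ [String.ofList wndw] else res)
          else
            pvLoopA s (s.length : Int) k ((j : Int) + ((m' + 1 : Nat) : Int) - 1 + 1)
              ((s.drop (j + 1)).take m') f0' f1'
              (if f1.length = 1 then res ++ [String.ofList wndw] else res))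
        = pvWinFold s (m' + 1)
            (if f1.length = 1 then res ++ [String.ofList wndw] else res) (List.range' (j + 1) k) := by
      intro f0' f1' hnd' hmem' hperm'
      have harg : (j : Int) + ((m' + 1 : Nat) : Int) - 1 + 1 = (((j + 1 : Nat)) : Int) + ((m' + 1 : Nat) : Int) - 1 := by
        push_cast; ring
      by_cases hk : 0 < k
      · have hlt2 : (j : Int) + ((m' + 1 : Nat) : Int) - 1 + 1 < (s.length : Int) := by push_cast; omega
        rw [if_pos hlt2]
        have hjm1 : j + m' + 1 < s.length := by omega
        have hidx : (j : Int) + ((m' + 1 : Nat) : Int) - 1 + 1 = ((j + m' + 1 : Nat) : Int) := by push_cast; ring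
        have hget : PySem.List.pyGet? s ((j : Int) + ((m' + 1 : Nat) : Int) - 1 + 1)
            = some (s[j + m' + 1]'hjm1) := by
          rw [hidx, PySem.List.pyGet?_natCast, List.getElem?_eq_getElem (by omega)]
        simp only [hget]
        have hwnew : (s.drop (j + 1)).take m' ++ [s[j + m' + 1]'hjm1] = (s.drop (j + 1)).take (m' + 1) := by
          rw [List.take_add_one, List.getElem?_drop, List.getElem?_eq_getElem (by omega)]
          simp [show j + 1 + m' = j + m' + 1 from by omega]
        have hrec : ∀ g0 g1 : List Char, g0.Nodup → (∀ c, c ∈ g0 ↔ c ∈ (s.drop (j + 1)).take (m' + 1)) →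
            (g0 ++ g1).Perm ((s.drop (j + 1)).take (m' + 1)) →
            pvLoopA s (s.length : Int) k ((j : Int) + ((m' + 1 : Nat) : Int) - 1 + 1)
              ((s.drop (j + 1)).take (m' + 1)) g0 g1
              (if f1.length = 1 then res ++ [String.ofList wndw] else res)
            = pvWinFold s (m' + 1)
                (if f1.length = 1 then res ++ [String.ofList wndw] else res) (List.range' (j + 1) k) := by
          intro g0 g1 h1 h2 h3
          rw [harg]
          exact ih (j + 1) _ g0 g1 _ (by omega) hms rfl h1 h2 h3
        by_cases hcf : s[j + m' + 1]'hjm1 ∈ f0'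
        · rw [if_neg (by simp [hcf] : ¬((!f0'.contains (s[j + m' + 1]'hjm1)) = true))]
          rw [hwnew]
          apply hrec
          · exact hnd'
          · intro d
            rw [hmem' d, ← hwnew]
            simp only [List.mem_append, List.mem_singleton]
            constructor
            · exact Or.inl
            · rintro (h | rfl)
              · exact h
              · exact (hmem' _).1 hcf
          · rw [List.perm_iff_count]; intro a
            have hpa := hperm'.count_eq a
            rw [← hwnew]
            by_cases hac : a = s[j + m' + 1]'hjm1
            · simp only [hac, List.count_append, List.count_cons_self, List.count_nil] at *
              omega
            · simp only [List.count_append] at *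
              omega
        · rw [if_pos (by simp [hcf] : ((!f0'.contains (s[j + m' + 1]'hjm1)) = true))]
          rw [hwnew]
          apply hrec
          · rw [List.nodup_append]
            exact ⟨hnd', List.nodup_singleton _, by
              intro a ha b hb; rw [List.mem_singleton] at hb; subst hb; exact fun h => hcf (h ▸ ha)⟩
          · intro d
            rw [← hwnew]
            simp only [List.mem_append, List.mem_singleton]
            rw [hmem' d]
          · rw [List.perm_iff_count]; intro a
            have hpa := hperm'.count_eq a
            rw [← hwnew]
            by_cases hac : a = s[j + m' + 1]'hjm1
            · simp only [hac, List.count_append, List.count_cons_self, List.count_nil] at *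
              omega
            · simp only [List.count_append] at *
              omega
      · have hk0 : k = 0 := by omega
        subst hk0
        have hnlt : ¬ ((j : Int) + ((m' + 1 : Nat) : Int) - 1 + 1 < (s.length : Int)) := by push_cast; omega
        rw [if_neg hnlt]
        simp [pvLoopA, pvWinFold]
    have hrhs : pvWinFold s (m' + 1) res (j :: List.range' (j + 1) k)
        = pvWinFold s (m' + 1)
            (if f1.length = 1 then res ++ [String.ofList wndw] else res) (List.range' (j + 1) k) := by
      simp only [pvWinFold, List.foldl_cons]
      congr 1
      rw [← hw]
      exact if_congr hcond.symm rfl rfl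
    rw [hrhs]
    by_cases hb : s[j] ∈ f1
    · have hcb : f1.contains s[j] = true := by simpa using hb
      have hbc : 1 ≤ f1.count s[j] := List.count_pos_iff.2 hb
      have hrest : s[j] ∈ (s.drop (j + 1)).take m' := by
        have hpa := hpacount s[j]
        rw [hwin] at hpa
        simp only [List.count_append, List.count_cons_self] at hpa
        exact List.count_pos_iff.1 (by omega)
      rw [if_pos hcb, PySem.List.remove?_eq_some_erase f1 s[j] hb]
      simp only [Option.map_some]
      apply key
      · exact hnd
      · intro d
        rw [hmem d, hwin]
        simp only [List.mem_cons]
        constructor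
        · rintro (rfl | h)
          · exact hrest
          · exact h
        · exact Or.inr
      · rw [List.perm_iff_count]; intro a
        have hpa := hpacount a
        rw [hwin] at hpa
        simp only [List.count_append] at hpa ⊢
        by_cases hac : a = s[j]
        · subst hac
          rw [List.count_erase_self]
          rw [List.count_cons_self] at hpa
          omega
        · rw [List.count_erase_of_ne hac]
          rw [List.count_cons_of_ne (Ne.symm hac)] at hpa
          omega
    · have hcb : f1.contains s[j] = false := by simpa using hb
      have hbc : f1.count s[j] = 0 := List.count_eq_zero.2 hb
      have hnrest : s[j] ∉ (s.drop (j + 1)).take m' := by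
        have hpa := hpacount s[j]
        rw [hwin] at hpa
        simp only [List.count_append, List.count_cons_self] at hpa
        rw [← List.count_eq_zero]
        omega
      rw [if_neg (by simp [hb]), PySem.List.remove?_eq_some_erase f0 s[j] hc0f0]
      simp only [Option.map_some]
      apply key
      · exact hnd.erase _
      · intro d
        rw [List.Nodup.mem_erase_iff hnd, hmem d, hwin]
        simp only [List.mem_cons]
        constructor
        · rintro ⟨hne, rfl | h⟩
          · exact absurd rfl hne
          · exact h
        · intro h
          exact ⟨fun hdc => hnrest (hdc ▸ h), Or.inr h⟩
      · rw [List.perm_iff_count]; intro a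
        have hpa := hpacount a
        rw [hwin] at hpa
        simp only [List.count_append] at hpa ⊢
        by_cases hac : a = s[j]
        · subst hac
          rw [List.count_erase_self]
          rw [List.count_cons_self] at hpa
          omega
        · rw [List.count_erase_of_ne hac]
          rw [List.count_cons_of_ne (Ne.symm hac)] at hpa
          omega

-- ===== VERDICT (by name: the statement is the Claim_ definition above) =====
theorem substringWithOneRepeated_spec : Claim_equal_substringWithOneRepeated := by
  intro inp num _ hpre
  unfold Spec_substringWithOneRepeated
  unfold Pre_substringWithOneRepeated at hpre
  by_cases h1 : num = 1
  · subst h1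
    unfold substringWithOneRepeated substringWithOneRepeated_alt
    rw [if_pos rfl, if_pos (Or.inl (le_refl (1 : Int)))]
  · by_cases hgt : num > ((inp.toList.length : Int))
    · unfold substringWithOneRepeated substringWithOneRepeated_alt
      rw [if_neg h1, if_pos hgt, if_pos (Or.inr hgt)]
    · have h2 : 2 ≤ num := by omega
      have hn : num ≤ (inp.toList.length : Int) := by omega
      have hnum : ((num.toNat : Nat) : Int) = num := Int.toNat_of_nonneg (by omega)
      have hm2 : 2 ≤ num.toNat := by omega
      have hms : num.toNat ≤ inp.toList.length := by omega
      rw [pv_alt_eq_winFold inp num h2 hn]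
      unfold substringWithOneRepeated
      rw [if_neg h1, if_neg hgt]
      rw [PySem.List.slice_to inp.toList (by omega : (0:Int) ≤ num)]
      obtain ⟨hnd, hmem, hperm⟩ := pv_buildFreq_inv (inp.toList.take num.toNat)
      have hfuel : (((inp.toList.length : Int)) - (num - 1)).toNat = inp.toList.length - num.toNat + 1 := by omega
      have harg : num - 1 = (((0 : Nat)) : Int) + ((num.toNat : Nat) : Int) - 1 := by push_cast; omega
      rw [hfuel, harg, List.range_eq_range']
      exact pv_loopA_eq inp.toList num.toNat hm2 (inp.toList.length - num.toNat + 1) 0 _ _ _ []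
        (by omega) hms (by simp) hnd hmem hperm
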